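-- pv_equiv track=rewrite | github.com/bhavishya0251btcs042-netizen/FarmAi | disease_model.py | _correct_scientific_names
-- ===== SOURCE A (Python) =====
-- def _correct_scientific_names(text: str) -> str:
--     """Fix common AI scientific name typos."""
--     corrections = {
--         "Venturia pirina": "Venturia pyrina",
--         "venturia pirina": "Venturia pyrina",
--         "Sphaerotheca pannosa": "Podosphaera pannosa",  # updated taxonomy
--         "Puccinia tritici": "Puccinia triticina",       # correct species name
--     }
--     for wrong, right in corrections.items():
--         text = text.replace(wrong, right)
--     return text
-- ===== SOURCE B (Python) =====
-- import re
--
--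
-- def _correct_scientific_names(text: str) -> str:
--     """Fix common AI scientific name typos (single regex pass)."""
--     corrections = {
--         "Venturia pirina": "Venturia pyrina",
--         "venturia pirina": "Venturia pyrina",
--         "Sphaerotheca pannosa": "Podosphaera pannosa",  # updated taxonomy
--         "Puccinia tritici": "Puccinia triticina",       # correct species name
--     }
--     pattern = re.compile("|".join(
--         re.escape(k) for k in sorted(corrections, key=len, reverse=True)))
--     return pattern.sub(lambda m: corrections[m.group(0)], text)
-- ===== Notes on version B (the rewrite author's own statement) =====
-- stated objective: idiomatic
-- what changed: Replaces four independent full-string replace passes by one compiled regex alternation over the escaped dictionary keys (longest first) applied in a single left-to-right re.sub scan that looks the replacement up in the dict.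
import Mathlib
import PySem

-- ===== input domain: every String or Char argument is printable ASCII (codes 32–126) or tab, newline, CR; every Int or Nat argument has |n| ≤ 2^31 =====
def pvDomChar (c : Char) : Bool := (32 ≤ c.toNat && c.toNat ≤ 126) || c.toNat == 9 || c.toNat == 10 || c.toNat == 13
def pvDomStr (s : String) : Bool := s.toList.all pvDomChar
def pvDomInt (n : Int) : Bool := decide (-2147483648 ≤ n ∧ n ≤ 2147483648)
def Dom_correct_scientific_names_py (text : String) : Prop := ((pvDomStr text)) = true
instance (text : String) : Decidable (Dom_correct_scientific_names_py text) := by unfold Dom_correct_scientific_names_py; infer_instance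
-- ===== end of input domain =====

-- B replaces A's four sequential full-string replace passes by one left-to-right scan
-- (a compiled regex alternation in Python) that substitutes on first match; same results.

-- ===== PORT A =====
-- the dict literal in insertion order, then the loop `for wrong, right in corrections.items(): text = text.replace(wrong, right)`
def correct_scientific_names_py (text : String) : String :=
  let corrections : List (String × String) :=
    [("Venturia pirina", "Venturia pyrina"),
     ("venturia pirina", "Venturia pyrina"),
     ("Sphaerotheca pannosa", "Podosphaera pannosa"),
     ("Puccinia tritici", "Puccinia triticina")]
  corrections.foldl (fun t p => PySem.Str.replace t p.1 p.2) text

-- ===== PORT B =====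
-- keys in Source B's pattern order (sorted by length, longest first, stable) and their replacements
def pvK3 : List Char := "Sphaerotheca pannosa".toList
def pvK4 : List Char := "Puccinia tritici".toList
def pvK1 : List Char := "Venturia pirina".toList
def pvK2 : List Char := "venturia pirina".toList
def pvR3 : List Char := "Podosphaera pannosa".toList
def pvR4 : List Char := "Puccinia triticina".toList
def pvR1 : List Char := "Venturia pyrina".toList

-- the single left-to-right scan performed by pattern.sub: at each position try the
-- alternation's branches in pattern order; on a match emit the dict's value and jump
-- past the match, otherwise emit the character and move on (exact port of re.sub over
-- a literal alternation)
def pvScanSub (s : List Char) : List Char :=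
  match s with
  | [] => []
  | c :: t =>
    if pvK3.isPrefixOf (c :: t) then pvR3 ++ pvScanSub ((c :: t).drop pvK3.length)
    else if pvK4.isPrefixOf (c :: t) then pvR4 ++ pvScanSub ((c :: t).drop pvK4.length)
    else if pvK1.isPrefixOf (c :: t) then pvR1 ++ pvScanSub ((c :: t).drop pvK1.length)
    else if pvK2.isPrefixOf (c :: t) then pvR1 ++ pvScanSub ((c :: t).drop pvK2.length)
    else c :: pvScanSub t
termination_by s.length
decreasing_by all_goals (simp [pvK1, pvK2, pvK3, pvK4]; try omega)

def correct_scientific_names_py_alt (text : String) : String :=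
  String.ofList (pvScanSub text.toList)

-- ===== PRECONDITION & SPEC =====
def Spec_correct_scientific_names_py (text : String) (out : String) : Prop := out = correct_scientific_names_py_alt text
instance (text : String) (out : String) : Decidable (Spec_correct_scientific_names_py text out) := by unfold Spec_correct_scientific_names_py; infer_instance

-- ===== CLAIM (what is proved, stated in full; the proofs are below) =====
def Claim_equal_correct_scientific_names_py : Prop := ∀ (text : String), Dom_correct_scientific_names_py text → Spec_correct_scientific_names_py text (correct_scientific_names_py text)

-- ===== LEMMAS AND PROOFS =====

-- fuel-free characterisation of PySem.Chars.replace for a nonempty pattern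
def pvRep (o : Char) (os new : List Char) (s : List Char) : List Char :=
  match s with
  | [] => []
  | c :: t =>
    if (o :: os).isPrefixOf (c :: t) then new ++ pvRep o os new ((c :: t).drop (o :: os).length)
    else c :: pvRep o os new t
termination_by s.length
decreasing_by all_goals (simp; try omega)

theorem pv_go_eq (o : Char) (os new : List Char) :
    ∀ (fuel : Nat) (l acc : List Char), l.length ≤ fuel →
      PySem.Chars.replace.go (o :: os) new fuel l acc = acc.reverse ++ pvRep o os new l := by
  intro fuel
  induction fuel with
  | zero =>
    intro l acc h
    have hl : l = [] := List.eq_nil_of_length_eq_zero (Nat.le_zero.mp h)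
    subst hl
    simp [PySem.Chars.replace.go, pvRep]
  | succ n ih =>
    intro l acc h
    cases l with
    | nil => simp [PySem.Chars.replace.go, pvRep]
    | cons c t =>
      by_cases hp : (o :: os).isPrefixOf (c :: t)
      · have hlen : ((c :: t).drop (o :: os).length).length ≤ n := by
          simp only [List.length_drop, List.length_cons] at *
          omega
        rw [show PySem.Chars.replace.go (o :: os) new (n+1) (c :: t) acc
              = PySem.Chars.replace.go (o :: os) new n ((c :: t).drop (o :: os).length)
                  (new.reverse ++ acc) by simp [PySem.Chars.replace.go, hp]]
        rw [ih _ _ hlen]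
        rw [show pvRep o os new (c :: t)
              = new ++ pvRep o os new ((c :: t).drop (o :: os).length) by
            rw [pvRep]; simp [hp]]
        simp
      · rw [show PySem.Chars.replace.go (o :: os) new (n+1) (c :: t) acc
              = PySem.Chars.replace.go (o :: os) new n t (c :: acc) by
            simp [PySem.Chars.replace.go, hp]]
        have hlen : t.length ≤ n := by simp at h; omega
        rw [ih _ _ hlen]
        rw [show pvRep o os new (c :: t) = c :: pvRep o os new t by
            rw [pvRep]; simp [hp]]
        simp

theorem pv_replace_eq (o : Char) (os new s : List Char) :
    PySem.Chars.replace s (o :: os) new = pvRep o os new s := by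
  unfold PySem.Chars.replace
  simp [pv_go_eq o os new s.length s [] (le_refl _)]

theorem pvRep_nil (o : Char) (os new : List Char) : pvRep o os new [] = [] := by
  rw [pvRep]

theorem pvRep_pos (o : Char) (os new x : List Char) :
    pvRep o os new ((o :: os) ++ x) = new ++ pvRep o os new x := by
  rw [show (o :: os) ++ x = o :: (os ++ x) from rfl, pvRep]
  have hp : (o :: os).isPrefixOf (o :: (os ++ x)) := by
    rw [List.isPrefixOf_iff_prefix]
    exact List.prefix_append _ _
  simp only [hp, if_true]
  congr 1
  rw [show o :: (os ++ x) = (o :: os) ++ x from rfl, List.drop_left]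

theorem pvRep_neg (o : Char) (os new : List Char) (c : Char) (t : List Char)
    (h : ¬ (o :: os) <+: (c :: t)) :
    pvRep o os new (c :: t) = c :: pvRep o os new t := by
  rw [pvRep]
  have hp : (o :: os).isPrefixOf (c :: t) = false := by
    rw [Bool.eq_false_iff]
    intro hb
    exact h (List.isPrefixOf_iff_prefix.mp hb)
  simp [hp]

-- no occurrence of the pattern starts inside b, so replace walks straight over it
theorem pvRep_skip (o : Char) (os new : List Char) (b : List Char)
    (H : ∀ y ∈ b.tails, y ≠ [] → ¬ y <+: (o :: os) ∧ ¬ (o :: os) <+: y) :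
    ∀ x, pvRep o os new (b ++ x) = b ++ pvRep o os new x := by
  induction b with
  | nil => intro x; simp
  | cons c b' ih =>
    intro x
    have hnp : ¬ (o :: os) <+: (c :: (b' ++ x)) := by
      intro hp
      rcases List.prefix_or_prefix_of_prefix hp (List.prefix_append (c :: b') x) with h1 | h1
      · exact (H (c :: b') (by rw [List.mem_tails]) (by simp)).2 h1
      · exact (H (c :: b') (by rw [List.mem_tails]) (by simp)).1 h1
    rw [show (c :: b') ++ x = c :: (b' ++ x) from rfl, pvRep_neg o os new c _ hnp]
    rw [ih (fun y hy hne => H y (by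
      rw [List.mem_tails] at hy ⊢
      exact hy.trans (List.suffix_cons c b')) hne) x]
    simp

-- replace cannot create a new occurrence of any nonempty suffix p' of p as a prefix
theorem pvRep_no_create (o : Char) (os new p : List Char)
    (H : ∀ y ∈ p.tails, y ≠ [] →
        (¬ y <+: (o :: os) ∧ ¬ (o :: os) <+: y) ∧ (¬ y <+: new ∧ ¬ new <+: y)) :
    ∀ (t : List Char) (p' : List Char), p' ∈ p.tails → p' <+: pvRep o os new t → p' <+: t := by
  intro t
  induction t using pvRep.induct o os with
  | case1 =>
    intro p' _ hp'
    rw [pvRep_nil] at hp'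
    exact hp'
  | case2 c t hp ih =>
    intro p' hmem hpre
    have hp' : (o :: os) <+: (c :: t) := List.isPrefixOf_iff_prefix.mp hp
    obtain ⟨x, hx⟩ := hp'
    rcases p' with _ | ⟨d, p''⟩
    · exact List.nil_prefix
    · exfalso
      rw [← hx, pvRep_pos] at hpre
      rcases List.prefix_or_prefix_of_prefix hpre (List.prefix_append new _) with h1 | h1
      · exact ((H _ hmem (by simp)).2).1 h1
      · exact ((H _ hmem (by simp)).2).2 h1
  | case3 c t hp ih =>
    intro p' hmem hpre
    rcases p' with _ | ⟨d, p''⟩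
    · exact List.nil_prefix
    · rw [pvRep_neg o os new c t (fun hh => by
        rw [List.isPrefixOf_iff_prefix] at hp; exact absurd hh (by simp [hp]))] at hpre
      rw [List.cons_prefix_cons] at hpre
      obtain ⟨hd, htl⟩ := hpre
      have hmem'' : p'' ∈ p.tails := by
        rw [List.mem_tails] at hmem ⊢
        exact (List.suffix_cons d p'').trans hmem
      have := ih p'' hmem'' htl
      rw [List.cons_prefix_cons]
      exact ⟨hd, this⟩

theorem pv_not_prefix {a b : List Char} (h : ¬ a.isPrefixOf b = true) : ¬ a <+: b := by
  intro hp
  exact h (List.isPrefixOf_iff_prefix.mpr hp)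

-- the keys split as head :: tail (the two Venturia keys share their tail)
def pvT12 : List Char := "enturia pirina".toList
def pvT3 : List Char := "phaerotheca pannosa".toList
def pvT4 : List Char := "uccinia tritici".toList

theorem pv_chain_scan : ∀ s : List Char,
    pvRep 'P' pvT4 pvR4 (pvRep 'S' pvT3 pvR3 (pvRep 'v' pvT12 pvR1 (pvRep 'V' pvT12 pvR1 s)))
      = pvScanSub s := by
  intro s
  induction s using pvScanSub.induct with
  | case1 => simp [pvRep_nil, pvScanSub]
  | case2 c t hp ih =>
    obtain ⟨x, hx⟩ := List.isPrefixOf_iff_prefix.mp hp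
    have hdrop : (c :: t).drop pvK3.length = x := by rw [← hx, List.drop_left]
    rw [pvScanSub]
    simp only [hp, if_true]
    rw [hdrop] at ih ⊢
    rw [← ih, ← hx]
    rw [pvRep_skip 'V' pvT12 pvR1 pvK3 (by decide) x,
        pvRep_skip 'v' pvT12 pvR1 pvK3 (by decide) (pvRep 'V' pvT12 pvR1 x),
        show pvK3 = 'S' :: pvT3 from by decide,
        pvRep_pos 'S' pvT3 pvR3 _,
        pvRep_skip 'P' pvT4 pvR4 pvR3 (by decide) _]
  | case3 c t hp3 hp ih =>
    obtain ⟨x, hx⟩ := List.isPrefixOf_iff_prefix.mp hp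
    have hdrop : (c :: t).drop pvK4.length = x := by rw [← hx, List.drop_left]
    rw [pvScanSub]
    simp only [hp3, hp, if_true, Bool.false_eq_true, if_false]
    rw [hdrop] at ih ⊢
    rw [← ih, ← hx]
    rw [pvRep_skip 'V' pvT12 pvR1 pvK4 (by decide) x,
        pvRep_skip 'v' pvT12 pvR1 pvK4 (by decide) (pvRep 'V' pvT12 pvR1 x),
        pvRep_skip 'S' pvT3 pvR3 pvK4 (by decide) _,
        show pvK4 = 'P' :: pvT4 from by decide,
        pvRep_pos 'P' pvT4 pvR4 _]
  | case4 c t hp3 hp4 hp ih =>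
    obtain ⟨x, hx⟩ := List.isPrefixOf_iff_prefix.mp hp
    have hdrop : (c :: t).drop pvK1.length = x := by rw [← hx, List.drop_left]
    rw [pvScanSub]
    simp only [hp3, hp4, hp, if_true, Bool.false_eq_true, if_false]
    rw [hdrop] at ih ⊢
    rw [← ih, ← hx]
    rw [show pvK1 = 'V' :: pvT12 from by decide,
        pvRep_pos 'V' pvT12 pvR1 x,
        pvRep_skip 'v' pvT12 pvR1 pvR1 (by decide) _,
        pvRep_skip 'S' pvT3 pvR3 pvR1 (by decide) _,
        pvRep_skip 'P' pvT4 pvR4 pvR1 (by decide) _]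
  | case5 c t hp3 hp4 hp1 hp ih =>
    obtain ⟨x, hx⟩ := List.isPrefixOf_iff_prefix.mp hp
    have hdrop : (c :: t).drop pvK2.length = x := by rw [← hx, List.drop_left]
    rw [pvScanSub]
    simp only [hp3, hp4, hp1, hp, if_true, Bool.false_eq_true, if_false]
    rw [hdrop] at ih ⊢
    rw [← ih, ← hx]
    rw [pvRep_skip 'V' pvT12 pvR1 pvK2 (by decide) x,
        show pvK2 = 'v' :: pvT12 from by decide,
        pvRep_pos 'v' pvT12 pvR1 _,
        pvRep_skip 'S' pvT3 pvR3 pvR1 (by decide) _,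
        pvRep_skip 'P' pvT4 pvR4 pvR1 (by decide) _]
  | case6 c t hp3 hp4 hp1 hp2 ih =>
    have n1 := pv_not_prefix hp1
    have n2 := pv_not_prefix hp2
    have n3 := pv_not_prefix hp3
    have n4 := pv_not_prefix hp4
    have n1' : ¬ ('V' :: pvT12) <+: (c :: t) := by
      rw [← show pvK1 = 'V' :: pvT12 from by decide]; exact n1
    have n2' : ¬ ('v' :: pvT12) <+: (c :: pvRep 'V' pvT12 pvR1 t) := by
      intro hpre
      rw [List.cons_prefix_cons] at hpre
      obtain ⟨hd, htl⟩ := hpre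
      have h1 := pvRep_no_create 'V' pvT12 pvR1 pvK2 (by decide) t pvT12 (by decide) htl
      exact n2 (by
        rw [show pvK2 = 'v' :: pvT12 from by decide, List.cons_prefix_cons]
        exact ⟨hd, h1⟩)
    have n3' : ¬ ('S' :: pvT3) <+: (c :: pvRep 'v' pvT12 pvR1 (pvRep 'V' pvT12 pvR1 t)) := by
      intro hpre
      rw [List.cons_prefix_cons] at hpre
      obtain ⟨hd, htl⟩ := hpre
      have h1 := pvRep_no_create 'v' pvT12 pvR1 pvK3 (by decide) _ pvT3 (by decide) htl
      have h2 := pvRep_no_create 'V' pvT12 pvR1 pvK3 (by decide) t pvT3 (by decide) h1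
      exact n3 (by
        rw [show pvK3 = 'S' :: pvT3 from by decide, List.cons_prefix_cons]
        exact ⟨hd, h2⟩)
    have n4' : ¬ ('P' :: pvT4) <+:
        (c :: pvRep 'S' pvT3 pvR3 (pvRep 'v' pvT12 pvR1 (pvRep 'V' pvT12 pvR1 t))) := by
      intro hpre
      rw [List.cons_prefix_cons] at hpre
      obtain ⟨hd, htl⟩ := hpre
      have h1 := pvRep_no_create 'S' pvT3 pvR3 pvK4 (by decide) _ pvT4 (by decide) htl
      have h2 := pvRep_no_create 'v' pvT12 pvR1 pvK4 (by decide) _ pvT4 (by decide) h1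
      have h3 := pvRep_no_create 'V' pvT12 pvR1 pvK4 (by decide) t pvT4 (by decide) h2
      exact n4 (by
        rw [show pvK4 = 'P' :: pvT4 from by decide, List.cons_prefix_cons]
        exact ⟨hd, h3⟩)
    rw [pvRep_neg 'V' pvT12 pvR1 c t n1',
        pvRep_neg 'v' pvT12 pvR1 c _ n2',
        pvRep_neg 'S' pvT3 pvR3 c _ n3',
        pvRep_neg 'P' pvT4 pvR4 c _ n4',
        ih]
    rw [pvScanSub]
    simp [hp1, hp2, hp3, hp4]

-- ===== VERDICT (by name: the statement is the Claim_ definition above) =====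
theorem correct_scientific_names_py_spec : Claim_equal_correct_scientific_names_py := by
  intro text _
  unfold Spec_correct_scientific_names_py correct_scientific_names_py correct_scientific_names_py_alt
  simp only [List.foldl]
  rw [← String.toList_inj]
  simp only [PySem.Str.toList_replace, String.toList_ofList]
  rw [show ("Venturia pirina" : String).toList = 'V' :: pvT12 from by decide,
      show ("venturia pirina" : String).toList = 'v' :: pvT12 from by decide,
      show ("Sphaerotheca pannosa" : String).toList = 'S' :: pvT3 from by decide,
      show ("Puccinia tritici" : String).toList = 'P' :: pvT4 from by decide,
      show ("Venturia pyrina" : String).toList = pvR1 from by decide,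
      show ("Podosphaera pannosa" : String).toList = pvR3 from by decide,
      show ("Puccinia triticina" : String).toList = pvR4 from by decide]
  rw [pv_replace_eq 'V' pvT12 pvR1, pv_replace_eq 'v' pvT12 pvR1,
      pv_replace_eq 'S' pvT3 pvR3, pv_replace_eq 'P' pvT4 pvR4]
  exact pv_chain_scan text.toList
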